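-- pv_equiv track=rewrite | github.com/MOONisYOUNG/algorithms-study | BOJ/no_1284_Home_Address.py | solution
-- ===== SOURCE A (Python) =====
-- def solution(N):
--     # 여백 먼저 생각하기 (호수판 경계, 숫자 사이 모두 고려)
--     answer = len(N) + 1
--
--     for n_str in N:
--         if n_str == '1':
--             answer += 2
--
--         elif n_str == '0':
--             answer += 4
--
--         else:
--             answer += 3
--
--     return answer
-- ===== SOURCE B (Python) =====
-- def solution(N):
--     return 4 * len(N) + 1 - N.count('1') + N.count('0')
-- ===== Notes on version B (the rewrite author's own statement) =====
-- stated objective: simpler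
-- what changed: Replaced the per-character branching loop with a closed-form arithmetic expression: 4*len(N) + 1 - count('1') + count('0').
import Mathlib
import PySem

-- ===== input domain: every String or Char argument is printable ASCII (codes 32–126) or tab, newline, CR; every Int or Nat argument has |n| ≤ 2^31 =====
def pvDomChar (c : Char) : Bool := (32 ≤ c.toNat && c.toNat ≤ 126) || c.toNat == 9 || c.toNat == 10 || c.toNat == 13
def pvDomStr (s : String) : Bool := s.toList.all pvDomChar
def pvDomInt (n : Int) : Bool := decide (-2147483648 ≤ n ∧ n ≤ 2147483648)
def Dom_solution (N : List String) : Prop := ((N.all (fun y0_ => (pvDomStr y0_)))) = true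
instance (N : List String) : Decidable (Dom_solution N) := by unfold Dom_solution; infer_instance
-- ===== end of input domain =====

-- B replaces A's branching loop by a closed-form count formula; objective: simpler.

-- ===== PORT A =====
def solution (N : List String) : Int :=
  N.foldl (fun answer n_str =>
    if n_str = "1" then answer + 2
    else if n_str = "0" then answer + 4
    else answer + 3) ((N.length : Int) + 1)

-- ===== PORT B =====
def solution_alt (N : List String) : Int :=
  4 * (N.length : Int) + 1 - (N.count "1" : Int) + (N.count "0" : Int)

-- ===== PRECONDITION & SPEC =====
def Spec_solution (N : List String) (out : Int) : Prop := out = solution_alt N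
instance (N : List String) (out : Int) : Decidable (Spec_solution N out) := by unfold Spec_solution; infer_instance

-- ===== CLAIM (what is proved, stated in full; the proofs are below) =====
def Claim_equal_solution : Prop := ∀ (N : List String), Dom_solution N → Spec_solution N (solution N)

-- ===== LEMMAS AND PROOFS =====

theorem solution_foldl_add (N : List String) (a : Int) :
    N.foldl (fun answer n_str =>
      if n_str = "1" then answer + 2
      else if n_str = "0" then answer + 4
      else answer + 3) a
    = a + 3 * (N.length : Int) - (N.count "1" : Int) + (N.count "0" : Int) := by
  induction N generalizing a with
  | nil => simp
  | cons h t ih =>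
    simp only [List.foldl_cons, List.count_cons, List.length_cons, ih]
    by_cases h1 : h = "1"
    · subst h1; simp; push_cast; ring
    · by_cases h0 : h = "0"
      · subst h0; simp [beq_iff_eq]; push_cast; ring
      · simp [h1, h0, beq_iff_eq, Ne.symm]
        push_cast; ring

-- ===== VERDICT (by name: the statement is the Claim_ definition above) =====
theorem solution_spec : Claim_equal_solution := by
  intro N _
  unfold Spec_solution solution solution_alt
  rw [solution_foldl_add]
  ring
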